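-- pv_equiv track=rewrite | github.com/bhagavansprasad/students | bharath/a2to3.py | python_port2x_to_3x
-- ===== SOURCE A (Python) =====
-- ignore_list = [
-- 	"#",
-- 	"'",
-- 	'"'
-- ]
--
-- def python_port2x_to_3x(line):
-- 	prefix = "print"
-- 	line = line.strip()
--
-- 	for byte in ignore_list:
-- 		if (line == byte):
-- 			return (False, -1)
--
-- 	if(line.startswith(prefix) == True):
-- 		j = len(prefix)
--
-- 		if (len(prefix) == len(line)):
-- 			return (False, -1)
--
-- 		if (line[len(prefix)] == " "):
-- 			while (line[j] == " "):
-- 				j = j + 1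
-- 			if (line[j] == "'" or line[j] == '"'):
-- 				return (True, j)
-- 		else:
-- 			if (line[j] == "'" or line[j] == '"'):
-- 				return (True, j)
--
-- 	return (False, -1)
-- ===== SOURCE B (Python) =====
-- def python_port2x_to_3x(line):
--     state = 0
--     for i, ch in enumerate(line.strip()):
--         if state < 5:
--             if ch != "print"[state]:
--                 return (False, -1)
--             state += 1
--         elif ch != " ":
--             return (True, i) if ch in ("'", '"') else (False, -1)
--     return (False, -1)
-- ===== Notes on version B (the rewrite author's own statement) =====
-- stated objective: alternative
-- what changed: B replaces A's ignore-list comparisons, startswith test, length check and index-walking while-loop by a single left-to-right character scan of the stripped line with a small state machine (states 0-4 match 'print', state 5 skips spaces) that early-returns at the first decisive character.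
import Mathlib
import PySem

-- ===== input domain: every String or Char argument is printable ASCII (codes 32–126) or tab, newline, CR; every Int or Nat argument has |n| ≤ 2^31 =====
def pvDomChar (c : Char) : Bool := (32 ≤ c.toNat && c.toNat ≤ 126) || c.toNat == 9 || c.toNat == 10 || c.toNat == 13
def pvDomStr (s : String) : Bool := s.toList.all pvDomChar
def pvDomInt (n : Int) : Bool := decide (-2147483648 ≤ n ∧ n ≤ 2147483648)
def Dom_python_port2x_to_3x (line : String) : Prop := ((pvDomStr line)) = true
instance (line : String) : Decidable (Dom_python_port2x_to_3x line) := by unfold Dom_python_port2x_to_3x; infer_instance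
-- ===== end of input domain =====

-- B replaces A's ignore-list comparisons, startswith test and index-walking while-loop by a
-- single left-to-right state-machine scan of the stripped line (objective: alternative).

-- ===== PORT A =====
-- the 'while (line[j] == " ")' loop; Python would raise IndexError past the end, which is
-- unreachable (the line is stripped), so running out of fuel / range just stops the loop
def pvSkipSpaces (cs : List Char) (j : Nat) (fuel : Nat) : Nat :=
  match fuel with
  | 0 => j
  | fuel + 1 =>
    if PySem.List.pyGet? cs (j : Int) = some ' ' then pvSkipSpaces cs (j + 1) fuel else j

def python_port2x_to_3x (line : String) : Bool × Int :=
  let pre : List Char := "print".toList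
  let l : List Char := (PySem.Str.strip line).toList
  if l = "#".toList then (false, -1)
  else if l = "'".toList then (false, -1)
  else if l = "\"".toList then (false, -1)
  else if PySem.Chars.startswith l pre then
    if pre.length = l.length then (false, -1)
    else if PySem.List.pyGet? l (pre.length : Int) = some ' ' then
      let j := pvSkipSpaces l pre.length l.length
      if PySem.List.pyGet? l (j : Int) = some '\'' ∨ PySem.List.pyGet? l (j : Int) = some '"' then
        (true, (j : Int))
      else (false, -1)
    else
      if PySem.List.pyGet? l (pre.length : Int) = some '\'' ∨
         PySem.List.pyGet? l (pre.length : Int) = some '"' then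
        (true, (pre.length : Int))
      else (false, -1)
  else (false, -1)

-- ===== PORT B =====
-- the 'for i, ch in enumerate(line.strip())' loop with its early returns, carried as a
-- structural recursion over the remaining characters with the index i and the state
def pvScanB : List Char → Nat → Nat → Bool × Int
  | [], _, _ => (false, -1)
  | c :: rest, i, state =>
    if state < 5 then
      if PySem.Str.pyGet? "print" (state : Int) ≠ some c then (false, -1)
      else pvScanB rest (i + 1) (state + 1)
    else if c ≠ ' ' then
      if c = '\'' ∨ c = '"' then (true, (i : Int)) else (false, -1)
    else pvScanB rest (i + 1) state

def python_port2x_to_3x_alt (line : String) : Bool × Int :=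
  pvScanB (PySem.Str.strip line).toList 0 0

-- ===== PRECONDITION & SPEC =====
def Spec_python_port2x_to_3x (line : String) (out : Bool × Int) : Prop := out = python_port2x_to_3x_alt line
instance (line : String) (out : Bool × Int) : Decidable (Spec_python_port2x_to_3x line out) := by unfold Spec_python_port2x_to_3x; infer_instance

-- ===== CLAIM (what is proved, stated in full; the proofs are below) =====
def Claim_equal_python_port2x_to_3x : Prop := ∀ (line : String), Dom_python_port2x_to_3x line → Spec_python_port2x_to_3x line (python_port2x_to_3x line)

-- ===== LEMMAS AND PROOFS =====

lemma pvSkipSpaces_eq (cs : List Char) :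
    ∀ (fuel j : Nat), cs.length ≤ j + fuel →
      pvSkipSpaces cs j fuel = j + ((cs.drop j).takeWhile (fun c => c == ' ')).length := by
  intro fuel
  induction fuel with
  | zero =>
      intro j h
      have hd : cs.drop j = [] := List.drop_eq_nil_of_le (by omega)
      simp [pvSkipSpaces, hd]
  | succ n ih =>
      intro j h
      by_cases hj : j < cs.length
      · have hdrop : cs.drop j = cs[j] :: cs.drop (j + 1) := List.drop_eq_getElem_cons hj
        by_cases hsp : cs[j] = ' '
        · have hget : PySem.List.pyGet? cs (j : Int) = some ' ' := by
            simp [PySem.List.pyGet?_natCast, List.getElem?_eq_getElem hj, hsp]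
          rw [pvSkipSpaces, if_pos hget, ih (j + 1) (by omega), hdrop]
          simp [hsp]
          omega
        · have hget : ¬ PySem.List.pyGet? cs (j : Int) = some ' ' := by
            simp [PySem.List.pyGet?_natCast, List.getElem?_eq_getElem hj, hsp]
          rw [pvSkipSpaces, if_neg hget, hdrop]
          simp [hsp]
      · have hd : cs.drop j = [] := List.drop_eq_nil_of_le (by omega)
        have hget : ¬ PySem.List.pyGet? cs (j : Int) = some ' ' := by
          simp [PySem.List.pyGet?_natCast, List.getElem?_eq_none (by omega : cs.length ≤ j)]
        rw [pvSkipSpaces, if_neg hget, hd]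
        simp

-- the space-skipping tail of B's scan (state = 5)
lemma pvScanB_tail (rest : List Char) :
    ∀ i, pvScanB rest i 5 =
      match (rest.dropWhile (fun c => c == ' ')).head? with
      | some c => if c = '\'' ∨ c = '"' then
          ((true : Bool), ((i + (rest.takeWhile (fun c => c == ' ')).length : Nat) : Int))
        else (false, -1)
      | none => (false, -1) := by
  induction rest with
  | nil => intro i; simp [pvScanB]
  | cons c rs ih =>
      intro i
      by_cases hc : c = ' '
      · subst hc
        rw [pvScanB]
        simp only [show ¬ (5 < 5) from by omega, if_false]
        rw [if_neg (by simp), ih (i + 1)]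
        have ht : List.takeWhile (fun c => c == ' ') (' ' :: rs)
            = ' ' :: List.takeWhile (fun c => c == ' ') rs := by simp
        have hd : List.dropWhile (fun c => c == ' ') (' ' :: rs)
            = List.dropWhile (fun c => c == ' ') rs := by simp
        rw [ht, hd]
        rcases h : (rs.dropWhile (fun c => c == ' ')).head? with _ | d
        · rfl
        · simp only []
          split_ifs with hq
          · refine congrArg _ (congrArg _ ?_)
            push_cast [List.length_cons]
            omega
          · rfl
      · rw [pvScanB]
        simp only [show ¬ (5 < 5) from by omega, if_false]
        rw [if_pos (by simp [hc])]
        have hd : List.dropWhile (fun c' => c' == ' ') (c :: rs) = c :: rs := by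
          simp [hc]
        have ht : List.takeWhile (fun c' => c' == ' ') (c :: rs) = [] := by
          simp [hc]
        rw [hd, ht]
        simp

-- the prefix-matching phase of B's scan (states 0..4) on a line that does start with "print"
lemma pvScanB_print (rest : List Char) (i : Nat) :
    pvScanB ("print".toList ++ rest) i 0 = pvScanB rest (i + 5) 5 := by
  show pvScanB ('p' :: 'r' :: 'i' :: 'n' :: 't' :: rest) i 0 = pvScanB rest (i + 5) 5
  rw [pvScanB, if_pos (by omega), if_neg (by decide)]
  rw [pvScanB, if_pos (by omega), if_neg (by decide)]
  rw [pvScanB, if_pos (by omega), if_neg (by decide)]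
  rw [pvScanB, if_pos (by omega), if_neg (by decide)]
  rw [pvScanB, if_pos (by omega), if_neg (by decide)]

-- B's scan returns (False, -1) on any line not starting with "print"
lemma pvScanB_nostart (l : List Char) (i : Nat)
    (h : ¬ PySem.Chars.startswith l "print".toList = true) :
    pvScanB l i 0 = (false, -1) := by
  have key : ∀ (p : List Char) (l : List Char) (i state : Nat),
      p = "print".toList.drop state → state + p.length = 5 →
      ¬ (p <+: l) → pvScanB l i state = (false, -1) := by
    intro p
    induction p with
    | nil => intro l i state _ _ hpre; exact absurd (List.nil_prefix) hpre
    | cons a p ih =>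
        intro l i state hp hlen hpre
        have hst : state < 5 := by simp at hlen; omega
        have hget : PySem.Str.pyGet? "print" (state : Int) = some a := by
          rw [PySem.Str.pyGet?_natCast]
          have : "print".toList[state]? = some a := by
            rw [← List.head?_drop, ← hp]; rfl
          exact this
        cases l with
        | nil => rfl
        | cons c rest =>
            rw [pvScanB, if_pos hst]
            by_cases hca : a = c
            · rw [if_neg (show ¬ PySem.Str.pyGet? "print" (state : Int) ≠ some c by
                simp only [ne_eq, not_not]; rw [hget, hca])]
              refine ih rest (i + 1) (state + 1) ?_ (by simp at hlen ⊢; omega) ?_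
              · rw [← List.drop_drop, ← hp, List.drop_one, List.tail_cons]
              · intro hc
                exact hpre (List.cons_prefix_cons.mpr ⟨hca, hc⟩)
            · rw [if_pos (show PySem.Str.pyGet? "print" (state : Int) ≠ some c by
                rw [hget]; exact fun h => hca (Option.some.inj h))]
  refine key "print".toList l i 0 rfl rfl ?_
  intro hc
  exact h ((PySem.Chars.startswith_iff l "print".toList).mpr hc)

lemma pvDropWhile_eq_drop (p : Char → Bool) (l : List Char) :
    l.dropWhile p = l.drop (l.takeWhile p).length := by
  induction l with
  | nil => simp
  | cons a l ih => by_cases h : p a <;> simp [h, ih]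

-- the core equivalence on the stripped character list
lemma pvMain (l : List Char) :
    (if l = "#".toList then ((false : Bool), (-1 : Int))
     else if l = "'".toList then (false, -1)
     else if l = "\"".toList then (false, -1)
     else if PySem.Chars.startswith l "print".toList then
       if ("print".toList).length = l.length then (false, -1)
       else if PySem.List.pyGet? l (("print".toList).length : Int) = some ' ' then
         if PySem.List.pyGet? l ((pvSkipSpaces l ("print".toList).length l.length : Nat) : Int) = some '\'' ∨
            PySem.List.pyGet? l ((pvSkipSpaces l ("print".toList).length l.length : Nat) : Int) = some '"' then
           (true, ((pvSkipSpaces l ("print".toList).length l.length : Nat) : Int))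
         else (false, -1)
       else
         if PySem.List.pyGet? l (("print".toList).length : Int) = some '\'' ∨
            PySem.List.pyGet? l (("print".toList).length : Int) = some '"' then
           (true, (("print".toList).length : Int))
         else (false, -1)
     else (false, -1)) = pvScanB l 0 0 := by
  by_cases hsw : PySem.Chars.startswith l "print".toList = true
  · obtain ⟨rest, hl⟩ := (PySem.Chars.startswith_iff l "print".toList).mp hsw
    subst hl
    have h1 : ¬ ("print".toList ++ rest = "#".toList) := by intro h; simp_all
    have h2 : ¬ ("print".toList ++ rest = "'".toList) := by intro h; simp_all
    have h3 : ¬ ("print".toList ++ rest = "\"".toList) := by intro h; simp_all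
    rw [if_neg h1, if_neg h2, if_neg h3, if_pos hsw,
        pvScanB_print rest 0, pvScanB_tail rest 5]
    rcases rest with _ | ⟨c, rs⟩
    · decide
    · have hpl : ("print".toList).length = 5 := rfl
      have hdrop5 : ("print".toList ++ c :: rs).drop 5 = c :: rs := by
        simp
      have hne : ¬ (("print".toList).length = ("print".toList ++ c :: rs).length) := by
        simp
      rw [if_neg hne]
      have hget5 : PySem.List.pyGet? ("print".toList ++ c :: rs) ((("print".toList).length : Int))
          = some c := by
        have h5 : (5 : Int) ≤ (rs.length : Int) + 1 + 1 + 1 + 1 + 1 := by omega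
        simp [PySem.List.pyGet?, PySem.List.pyIdx?, h5]
      rw [hpl] at hget5 ⊢
      by_cases hc : c = ' '
      · subst hc
        rw [if_pos hget5]
        have hsk := pvSkipSpaces_eq ("print".toList ++ ' ' :: rs)
            (("print".toList ++ ' ' :: rs).length) 5 (by omega)
        rw [hdrop5] at hsk
        rw [hsk]
        have hdropj : ("print".toList ++ ' ' :: rs).drop
            (5 + ((' ' :: rs).takeWhile (fun c => c == ' ')).length)
            = (' ' :: rs).dropWhile (fun c => c == ' ') := by
          rw [← List.drop_drop, hdrop5]
          exact (pvDropWhile_eq_drop _ _).symm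
        have hhead : PySem.List.pyGet? ("print".toList ++ ' ' :: rs)
            ((5 + ((' ' :: rs).takeWhile (fun c => c == ' ')).length : Nat) : Int)
            = ((' ' :: rs).dropWhile (fun c => c == ' ')).head? := by
          rw [PySem.List.pyGet?_natCast, ← List.head?_drop, hdropj]
        rw [hhead]
        rcases h : ((' ' :: rs).dropWhile (fun c => c == ' ')).head? with _ | d
        · simp
        · simp
      · have hcb : (c == ' ') = false := by simp [hc]
        rw [if_neg (by rw [hget5]; simp [hc])]
        rw [hget5]
        have hd : (c :: rs).dropWhile (fun c' => c' == ' ') = c :: rs := by simp [hcb]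
        have ht : (c :: rs).takeWhile (fun c' => c' == ' ') = [] := by simp [hcb]
        rw [hd, ht]
        simp
  · rw [pvScanB_nostart l 0 hsw]
    simp only [Bool.not_eq_true] at hsw
    simp only [hsw, Bool.false_eq_true, if_false]
    split_ifs <;> rfl

-- ===== VERDICT (by name: the statement is the Claim_ definition above) =====
theorem python_port2x_to_3x_spec : Claim_equal_python_port2x_to_3x := by
  intro line _
  unfold Spec_python_port2x_to_3x python_port2x_to_3x python_port2x_to_3x_alt
  exact pvMain (PySem.Str.strip line).toList
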